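-- pv_equiv track=rewrite | github.com/Ralf-Kemmann/Quantum-Spacetime-Bridge | scripts/run_bmc15_geometry_proxy_diagnostics.py | unweighted_shells
-- ===== SOURCE A (Python) =====
-- from collections import defaultdict, deque
-- from typing import Any, Dict, List, Sequence, Set, Tuple
--
-- def nodes_from_edges(rows: Sequence[Dict[str, Any]]) -> List[str]:
--     return sorted({str(r["source"]) for r in rows} | {str(r["target"]) for r in rows})
--
-- def unweighted_shells(rows: Sequence[Dict[str, Any]], seed_nodes: Set[str]) -> Dict[str, int]:
--     nodes = nodes_from_edges(rows)
--     adj: Dict[str, Set[str]] = {n: set() for n in nodes}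
--     for r in rows:
--         a = str(r["source"])
--         b = str(r["target"])
--         adj[a].add(b)
--         adj[b].add(a)
--
--     dist: Dict[str, int] = {n: 10**9 for n in nodes}
--     q = deque()
--     for n in seed_nodes:
--         if n in dist:
--             dist[n] = 0
--             q.append(n)
--
--     while q:
--         cur = q.popleft()
--         for nxt in adj.get(cur, set()):
--             if dist[nxt] > dist[cur] + 1:
--                 dist[nxt] = dist[cur] + 1
--                 q.append(nxt)
--     return dist
-- ===== SOURCE B (Python) =====
-- def unweighted_shells(rows, seed_nodes):
--     nodes = sorted({str(r["source"]) for r in rows} | {str(r["target"]) for r in rows})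
--     INF = 10**9
--     dist = {n: (0 if n in seed_nodes else INF) for n in nodes}
--     edges = [(str(r["source"]), str(r["target"])) for r in rows]
--     changed = True
--     while changed:
--         changed = False
--         for a, b in edges:
--             if dist[a] + 1 < dist[b]:
--                 dist[b] = dist[a] + 1
--                 changed = True
--             if dist[b] + 1 < dist[a]:
--                 dist[a] = dist[b] + 1
--                 changed = True
--     return dist
-- ===== Notes on version B (the rewrite author's own statement) =====
-- stated objective: alternative
-- what changed: Replaces the seeded BFS traversal (deque of nodes, per-node expansion over an adjacency map) by Bellman-Ford-style global relaxation: dist is initialised directly from the seed set and the plain edge list is swept repeatedly, relaxing both directions of each edge, until a full pass changes nothing; no queue, no adjacency structure, no per-node traversal.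
import Mathlib
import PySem

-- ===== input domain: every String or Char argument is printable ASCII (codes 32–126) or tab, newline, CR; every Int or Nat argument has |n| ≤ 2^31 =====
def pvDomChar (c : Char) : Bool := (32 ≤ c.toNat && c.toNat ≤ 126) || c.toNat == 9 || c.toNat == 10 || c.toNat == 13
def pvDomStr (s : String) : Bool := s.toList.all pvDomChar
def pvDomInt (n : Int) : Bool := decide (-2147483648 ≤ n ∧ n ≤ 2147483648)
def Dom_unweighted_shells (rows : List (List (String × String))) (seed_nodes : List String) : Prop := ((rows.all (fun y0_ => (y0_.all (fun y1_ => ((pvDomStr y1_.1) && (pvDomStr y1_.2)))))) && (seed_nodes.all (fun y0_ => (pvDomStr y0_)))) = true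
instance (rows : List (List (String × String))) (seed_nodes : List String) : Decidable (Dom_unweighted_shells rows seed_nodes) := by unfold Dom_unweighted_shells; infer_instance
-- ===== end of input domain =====

-- B replaces A's seeded BFS (deque + adjacency map) by Bellman-Ford-style global relaxation over
-- the plain edge list, swept until a pass changes nothing (objective: alternative algorithm).

-- Python str(r["source"]) raises KeyError when the key is missing; Pre_ excludes that, so getD "" is exact
def pvStr (r : List (String × String)) (k : String) : String :=
  (PySem.Dict.mk r).getD k ""

-- both Pythons compute sorted({str(r["source"])…} | {str(r["target"])…})
def pvNodes (rows : List (List (String × String))) : List String :=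
  PySem.List.sorted
    (PySem.Set.union (PySem.Set.ofList (rows.map (fun r => pvStr r "source")))
      (PySem.Set.ofList (rows.map (fun r => pvStr r "target"))))
    (fun x => x) false

-- ===== PORT A =====
-- adj[a].add(b); adj[b].add(a): the keys a, b always exist, so Dict.modify is exact
def pvAdj (rows : List (List (String × String))) : PySem.Dict String (PySem.Set String) :=
  let adj0 := (pvNodes rows).foldl (fun d n => d.insert n PySem.Set.empty) PySem.Dict.empty
  rows.foldl (fun d r =>
    let a := pvStr r "source"
    let b := pvStr r "target"
    let d := d.modify a PySem.Set.empty (fun s => PySem.Set.add s b)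
    d.modify b PySem.Set.empty (fun s => PySem.Set.add s a)) adj0

-- body of A's inner 'for nxt in adj.get(cur, set())' loop (dist[nxt] / dist[cur] always have keys)
def pvStepA (cur : String) (p : PySem.Dict String Int × List String) (nxt : String) :
    PySem.Dict String Int × List String :=
  if p.1.getD nxt 0 > p.1.getD cur 0 + 1 then
    (p.1.insert nxt (p.1.getD cur 0 + 1), p.2 ++ [nxt])
  else p

-- A's 'while q' loop; the fuel exceeds q.length + sum of dist values, so it never runs out
def pvGoA (adj : PySem.Dict String (PySem.Set String)) :
    Nat → List String → PySem.Dict String Int → PySem.Dict String Int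
  | 0, _, dist => dist
  | _ + 1, [], dist => dist
  | fuel + 1, cur :: rest, dist =>
      let p := (adj.getD cur PySem.Set.empty).foldl (pvStepA cur) (dist, [])
      pvGoA adj fuel (rest ++ p.2) p.1

def pvDist0 (rows : List (List (String × String))) : PySem.Dict String Int :=
  (pvNodes rows).foldl (fun d n => d.insert n 1000000000) PySem.Dict.empty

def pvSeedP (rows : List (List (String × String))) (seeds : List String) :
    PySem.Dict String Int × List String :=
  seeds.foldl (fun (p : PySem.Dict String Int × List String) n =>
    if p.1.contains n then (p.1.insert n 0, p.2 ++ [n]) else p) (pvDist0 rows, [])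

def pvFinalA (rows : List (List (String × String))) (seeds : List String) : PySem.Dict String Int :=
  pvGoA (pvAdj rows) (seeds.length + (pvNodes rows).length * 1000000000 + 1)
    (pvSeedP rows seeds).2 (pvSeedP rows seeds).1

-- 'return dist' as an association list (a named wrapper around Dict.items)
def pvItems (d : PySem.Dict String Int) : List (String × Int) := d.items

-- dist = {n: 10**9 for n in nodes}; seed loop; while-loop; return dist
def unweighted_shells (rows : List (List (String × String))) (seed_nodes : List String) : List (String × Int) :=
  pvItems (pvFinalA rows seed_nodes)

-- ===== PORT B =====
-- edges = [(str(r["source"]), str(r["target"])) for r in rows]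
def pvEdges (rows : List (List (String × String))) : List (String × String) :=
  rows.map (fun r => (pvStr r "source", pvStr r "target"))

-- dist = {n: (0 if n in seed_nodes else INF) for n in nodes}
def pvDistBF (rows : List (List (String × String))) (seeds : List String) : PySem.Dict String Int :=
  (pvNodes rows).foldl
    (fun d n => d.insert n (if seeds.contains n then 0 else 1000000000)) PySem.Dict.empty

-- the two sequential relaxation ifs of B's inner 'for a, b in edges' loop; .2 is 'changed'
def pvStepBF (p : PySem.Dict String Int × Bool) (e : String × String) :
    PySem.Dict String Int × Bool :=
  let p := if p.1.getD e.1 0 + 1 < p.1.getD e.2 0 then (p.1.insert e.2 (p.1.getD e.1 0 + 1), true) else p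
  if p.1.getD e.2 0 + 1 < p.1.getD e.1 0 then (p.1.insert e.1 (p.1.getD e.2 0 + 1), true) else p

-- B's 'while changed' loop; each continuing pass lowers the distance sum, so the fuel suffices
def pvGoBF (edges : List (String × String)) :
    Nat → PySem.Dict String Int → PySem.Dict String Int
  | 0, d => d
  | fuel + 1, d =>
      let p := edges.foldl pvStepBF (d, false)
      if p.2 then pvGoBF edges fuel p.1 else p.1

def unweighted_shells_alt (rows : List (List (String × String))) (seed_nodes : List String) : List (String × Int) :=
  pvItems (pvGoBF (pvEdges rows) ((pvNodes rows).length * 1000000000 + 1)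
    (pvDistBF rows seed_nodes))

-- ===== PRECONDITION & SPEC =====
-- Pre_ excludes exactly the rows on which Python A raises KeyError: a row without a
-- "source" or "target" key (r["source"] / r["target"]).
def Pre_unweighted_shells (rows : List (List (String × String))) (seed_nodes : List String) : Prop :=
  ∀ r ∈ rows, (PySem.Dict.mk r).contains "source" = true ∧ (PySem.Dict.mk r).contains "target" = true

instance (rows : List (List (String × String))) (seed_nodes : List String) :
    Decidable (Pre_unweighted_shells rows seed_nodes) := by
  unfold Pre_unweighted_shells; infer_instance

def pvWitness_unweighted_shells : (List (List (String × String))) × List String :=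
  ([[("source", "a"), ("target", "b")], [("source", "b"), ("target", "c")]], ["a"])

def Spec_unweighted_shells (rows : List (List (String × String))) (seed_nodes : List String)
    (out : List (String × Int)) : Prop := out = unweighted_shells_alt rows seed_nodes

instance (rows : List (List (String × String))) (seed_nodes : List String) (out : List (String × Int)) :
    Decidable (Spec_unweighted_shells rows seed_nodes out) := by
  unfold Spec_unweighted_shells; infer_instance

-- ===== CLAIM (what is proved, stated in full; the proofs are below) =====
def Claim_equal_unweighted_shells : Prop := ∀ (rows : List (List (String × String))) (seed_nodes : List String), Dom_unweighted_shells rows seed_nodes → Pre_unweighted_shells rows seed_nodes → Spec_unweighted_shells rows seed_nodes (unweighted_shells rows seed_nodes)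

-- ===== LEMMAS AND PROOFS =====

-- the edge relation and multi-source reachability both loops are about
def pvE (adj : PySem.Dict String (PySem.Set String)) (u v : String) : Prop :=
  v ∈ adj.getD u PySem.Set.empty

inductive pvReach (adj : PySem.Dict String (PySem.Set String)) (seeds nodes : List String) :
    Nat → String → Prop
  | seed {k : Nat} {s : String} (h1 : s ∈ seeds) (h2 : s ∈ nodes) : pvReach adj seeds nodes k s
  | step {k : Nat} {u v : String} (h : pvReach adj seeds nodes k u) (he : pvE adj u v) :
      pvReach adj seeds nodes (k + 1) v

-- what both loops compute: keys = nodes, distances sound, seeds at 0, and edge-consistent;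
-- pvGood_unique shows any two such tables agree (they are min(10^9, BFS distance))
def pvGood (adj : PySem.Dict String (PySem.Set String)) (seeds nodes : List String)
    (d : PySem.Dict String Int) : Prop :=
  d.keys = nodes ∧
  (∀ n ∈ nodes, 0 ≤ d.getD n 0 ∧ d.getD n 0 ≤ 1000000000 ∧
      (d.getD n 0 = 1000000000 ∨ pvReach adj seeds nodes (d.getD n 0).toNat n)) ∧
  (∀ s ∈ seeds, s ∈ nodes → d.getD s 0 = 0) ∧
  (∀ u ∈ nodes, ∀ v, pvE adj u v → d.getD v 0 ≤ d.getD u 0 + 1)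

theorem pvReach_mem {adj : PySem.Dict String (PySem.Set String)} {seeds nodes : List String}
    (hadj : ∀ u v, pvE adj u v → v ∈ nodes) {k n} (h : pvReach adj seeds nodes k n) : n ∈ nodes := by
  induction h with
  | seed h1 h2 => exact h2
  | step h he ih => exact hadj _ _ he

theorem pvGood_complete {adj : PySem.Dict String (PySem.Set String)} {seeds nodes : List String}
    {d : PySem.Dict String Int} (hadj : ∀ u v, pvE adj u v → v ∈ nodes)
    (hg : pvGood adj seeds nodes d) :
    ∀ k n, pvReach adj seeds nodes k n → d.getD n 0 ≤ (k : Int) := by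
  intro k n h
  induction h with
  | seed h1 h2 => simp [hg.2.2.1 _ h1 h2]
  | @step k u v h he ih =>
    have hu : u ∈ nodes := pvReach_mem hadj h
    have := hg.2.2.2 u hu v he
    push_cast
    omega

theorem pvGood_unique {adj : PySem.Dict String (PySem.Set String)} {seeds nodes : List String}
    {d1 d2 : PySem.Dict String Int} (hadj : ∀ u v, pvE adj u v → v ∈ nodes)
    (h1 : pvGood adj seeds nodes d1) (h2 : pvGood adj seeds nodes d2) :
    ∀ n ∈ nodes, d1.getD n 0 = d2.getD n 0 := by
  intro n hn
  obtain ⟨hn1, hc1, hr1⟩ := h1.2.1 n hn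
  obtain ⟨hn2, hc2, hr2⟩ := h2.2.1 n hn
  have le12 : d1.getD n 0 ≤ d2.getD n 0 := by
    rcases hr2 with h | h
    · omega
    · have := pvGood_complete hadj h1 _ _ h
      omega
  have le21 : d2.getD n 0 ≤ d1.getD n 0 := by
    rcases hr1 with h | h
    · omega
    · have := pvGood_complete hadj h2 _ _ h
      omega
  omega

theorem pvSumMap_le {α : Type} {l : List α} {f g : α → Nat} (h : ∀ x ∈ l, f x ≤ g x) :
    (l.map f).sum ≤ (l.map g).sum := by
  induction l with
  | nil => simp
  | cons x xs ih =>
    simp only [List.map_cons, List.sum_cons]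
    exact Nat.add_le_add (h x (by simp)) (ih (fun y hy => h y (by simp [hy])))

theorem pvSumMap_lt {α : Type} {l : List α} {f g : α → Nat} (h : ∀ x ∈ l, f x ≤ g x)
    {v} (hv : v ∈ l) (hs : f v < g v) : (l.map f).sum < (l.map g).sum := by
  induction l with
  | nil => simp at hv
  | cons x xs ih =>
    simp only [List.map_cons, List.sum_cons]
    rcases List.mem_cons.1 hv with rfl | hv'
    · exact Nat.add_lt_add_of_lt_of_le hs (pvSumMap_le (fun y hy => h y (by simp [hy])))
    · exact Nat.add_lt_add_of_le_of_lt (h x (by simp))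
        (ih (fun y hy => h y (by simp [hy])) hv')

def pvMsum (nodes : List String) (d : PySem.Dict String Int) : Nat :=
  (nodes.map (fun n => (d.getD n 0).toNat)).sum

-- value of a per-key-insert loop
theorem pvFoldInsertFun (f : String → Int) :
    ∀ (l : List String) (d : PySem.Dict String Int) (n : String),
    (l.foldl (fun d x => d.insert x (f x)) d).getD n 0 = if n ∈ l then f n else d.getD n 0 := by
  intro l
  induction l with
  | nil => simp
  | cons x xs ih =>
    intro d n
    simp only [List.foldl_cons, ih, PySem.Dict.getD_insert]
    by_cases h1 : n ∈ xs <;> by_cases h2 : n = x <;> simp [h1, h2, List.mem_cons]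

-- ---------- A side ----------

-- invariants through A's inner relaxation loop over the neighbours of cur
theorem pvA_inner (adj : PySem.Dict String (PySem.Set String)) (seeds nodes : List String)
    (cur : String) (hcurn : cur ∈ nodes) :
    ∀ (ns : List String) (dist : PySem.Dict String Int) (ap : List String),
    (∀ v ∈ ns, v ∈ nodes) →
    (∀ v ∈ ns, pvE adj cur v) →
    dist.keys = nodes →
    (∀ n ∈ nodes, 0 ≤ dist.getD n 0 ∧ dist.getD n 0 ≤ 1000000000 ∧
        (dist.getD n 0 = 1000000000 ∨ pvReach adj seeds nodes (dist.getD n 0).toNat n)) →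
    (∀ s ∈ seeds, s ∈ nodes → dist.getD s 0 = 0) →
    ((ns.foldl (pvStepA cur) (dist, ap)).1.keys = nodes ∧
     (∀ n, (ns.foldl (pvStepA cur) (dist, ap)).1.getD n 0 ≤ dist.getD n 0) ∧
     (ns.foldl (pvStepA cur) (dist, ap)).1.getD cur 0 = dist.getD cur 0 ∧
     (∀ v ∈ ns, (ns.foldl (pvStepA cur) (dist, ap)).1.getD v 0 ≤
        (ns.foldl (pvStepA cur) (dist, ap)).1.getD cur 0 + 1) ∧
     (∀ n, (ns.foldl (pvStepA cur) (dist, ap)).1.getD n 0 < dist.getD n 0 →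
        n ∈ (ns.foldl (pvStepA cur) (dist, ap)).2) ∧
     (∀ n ∈ (ns.foldl (pvStepA cur) (dist, ap)).2, n ∈ ap ∨ n ∈ ns) ∧
     (∃ t, (ns.foldl (pvStepA cur) (dist, ap)).2 = ap ++ t) ∧
     (∀ n ∈ nodes, 0 ≤ (ns.foldl (pvStepA cur) (dist, ap)).1.getD n 0 ∧
        (ns.foldl (pvStepA cur) (dist, ap)).1.getD n 0 ≤ 1000000000 ∧
        ((ns.foldl (pvStepA cur) (dist, ap)).1.getD n 0 = 1000000000 ∨
          pvReach adj seeds nodes ((ns.foldl (pvStepA cur) (dist, ap)).1.getD n 0).toNat n)) ∧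
     (∀ s ∈ seeds, s ∈ nodes → (ns.foldl (pvStepA cur) (dist, ap)).1.getD s 0 = 0) ∧
     pvMsum nodes (ns.foldl (pvStepA cur) (dist, ap)).1 +
        (ns.foldl (pvStepA cur) (dist, ap)).2.length ≤ pvMsum nodes dist + ap.length) := by
  intro ns
  induction ns with
  | nil =>
    intro dist ap _ _ hkeys hsound hseed
    exact ⟨hkeys, fun n => le_refl _, rfl, by simp, fun n h => absurd h (lt_irrefl _), by simp,
      ⟨[], by simp⟩, hsound, hseed, by simp⟩
  | cons v vs ih =>
    intro dist ap hns hEns hkeys hsound hseed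
    have hvn : v ∈ nodes := hns v (by simp)
    obtain ⟨hv0, hvcap, hvr⟩ := hsound v hvn
    obtain ⟨hc0, hccap, hcr⟩ := hsound cur hcurn
    by_cases hc : dist.getD v 0 > dist.getD cur 0 + 1
    · -- relaxation fires
      have hvcur : v ≠ cur := by rintro rfl; omega
      have hstep : pvStepA cur (dist, ap) v =
          (dist.insert v (dist.getD cur 0 + 1), ap ++ [v]) := by
        simp [pvStepA, hc]
      have hget1 : ∀ n, (dist.insert v (dist.getD cur 0 + 1)).getD n 0 =
          if n = v then dist.getD cur 0 + 1 else dist.getD n 0 := by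
        intro n; simp [PySem.Dict.getD_insert]
      have hgv : (dist.insert v (dist.getD cur 0 + 1)).getD v 0 = dist.getD cur 0 + 1 := by
        simp [PySem.Dict.getD_insert]
      have hkeys1 : (dist.insert v (dist.getD cur 0 + 1)).keys = nodes := by
        rw [PySem.Dict.keys_insert_of_contains, hkeys]
        rw [PySem.Dict.contains_iff_mem_keys, hkeys]; exact hvn
      have hsound1 : ∀ n ∈ nodes, 0 ≤ (dist.insert v (dist.getD cur 0 + 1)).getD n 0 ∧
          (dist.insert v (dist.getD cur 0 + 1)).getD n 0 ≤ 1000000000 ∧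
          ((dist.insert v (dist.getD cur 0 + 1)).getD n 0 = 1000000000 ∨
            pvReach adj seeds nodes ((dist.insert v (dist.getD cur 0 + 1)).getD n 0).toNat n) := by
        intro n hn
        by_cases hnv : n = v
        · subst hnv
          rw [hgv]
          refine ⟨by omega, by omega, Or.inr ?_⟩
          rcases hcr with hcap | hcre
          · omega
          · have ht : (dist.getD cur 0 + 1).toNat = (dist.getD cur 0).toNat + 1 := by omega
            rw [ht]
            exact pvReach.step hcre (hEns n (by simp))
        · rw [hget1, if_neg hnv]
          exact hsound n hn
      have hseed1 : ∀ s ∈ seeds, s ∈ nodes →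
          (dist.insert v (dist.getD cur 0 + 1)).getD s 0 = 0 := by
        intro s hs hsn
        by_cases hsv : s = v
        · subst hsv; rw [hgv]; have := hseed s hs hsn; omega
        · rw [hget1, if_neg hsv]; exact hseed s hs hsn
      have R := ih (dist.insert v (dist.getD cur 0 + 1)) (ap ++ [v])
        (fun w hw => hns w (by simp [hw])) (fun w hw => hEns w (by simp [hw]))
        hkeys1 hsound1 hseed1
      obtain ⟨R1, R2, R3, R4, R5, R6, R7, R8, R9, R10⟩ := R
      simp only [List.foldl_cons, hstep] at *
      have hmono1 : ∀ n, (dist.insert v (dist.getD cur 0 + 1)).getD n 0 ≤ dist.getD n 0 := by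
        intro n
        rw [hget1]
        split_ifs with h
        · subst h; omega
        · exact le_refl _
      have hcur1 : (dist.insert v (dist.getD cur 0 + 1)).getD cur 0 = dist.getD cur 0 := by
        rw [hget1, if_neg (Ne.symm hvcur)]
      refine ⟨R1, ?_, ?_, ?_, ?_, ?_, ?_, R8, R9, ?_⟩
      · intro n; exact le_trans (R2 n) (hmono1 n)
      · rw [R3, hcur1]
      · intro w hw
        rcases List.mem_cons.1 hw with rfl | hw'
        · have h1 := R2 w
          rw [hgv] at h1
          rw [R3, hcur1]
          omega
        · exact R4 w hw'
      · intro n hlt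
        by_cases h1 : (vs.foldl (pvStepA cur) (dist.insert v (dist.getD cur 0 + 1), ap ++ [v])).1.getD n 0
            < (dist.insert v (dist.getD cur 0 + 1)).getD n 0
        · exact R5 n h1
        · have heq : (vs.foldl (pvStepA cur) (dist.insert v (dist.getD cur 0 + 1), ap ++ [v])).1.getD n 0
              = (dist.insert v (dist.getD cur 0 + 1)).getD n 0 := le_antisymm (R2 n) (by omega)
          have hnv : n = v := by
            by_contra hne
            rw [hget1, if_neg hne] at heq
            omega
          subst hnv
          obtain ⟨t, ht⟩ := R7
          rw [ht]
          simp
      · intro n hn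
        rcases R6 n hn with h1 | h1
        · rcases List.mem_append.1 h1 with h2 | h2
          · exact Or.inl h2
          · simp at h2; subst h2; exact Or.inr (by simp)
        · exact Or.inr (by simp [h1])
      · obtain ⟨t, ht⟩ := R7
        exact ⟨[v] ++ t, by simp [ht]⟩
      · have hdec : pvMsum nodes (dist.insert v (dist.getD cur 0 + 1)) < pvMsum nodes dist := by
          apply pvSumMap_lt (f := fun n => ((dist.insert v (dist.getD cur 0 + 1)).getD n 0).toNat)
            (g := fun n => (dist.getD n 0).toNat)
          · intro x hx; have := hmono1 x; omega
          · exact hvn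
          · rw [hgv]; omega
        simp only [List.length_append, List.length_cons, List.length_nil] at R10 ⊢
        omega
    · -- no relaxation
      have hstep : pvStepA cur (dist, ap) v = (dist, ap) := by simp [pvStepA, hc]
      have R := ih dist ap (fun w hw => hns w (by simp [hw])) (fun w hw => hEns w (by simp [hw]))
        hkeys hsound hseed
      obtain ⟨R1, R2, R3, R4, R5, R6, R7, R8, R9, R10⟩ := R
      simp only [List.foldl_cons, hstep] at *
      refine ⟨R1, R2, R3, ?_, R5, ?_, R7, R8, R9, R10⟩
      · intro w hw
        rcases List.mem_cons.1 hw with rfl | hw'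
        · have := R2 w; rw [R3]; omega
        · exact R4 w hw'
      · intro n hn
        rcases R6 n hn with h1 | h1
        · exact Or.inl h1
        · exact Or.inr (by simp [h1])

theorem pvGoA_cons (adj : PySem.Dict String (PySem.Set String)) (fuel : Nat) (cur : String)
    (rest : List String) (dist : PySem.Dict String Int) :
    pvGoA adj (fuel + 1) (cur :: rest) dist =
      pvGoA adj fuel (rest ++ ((adj.getD cur PySem.Set.empty).foldl (pvStepA cur) (dist, [])).2)
        ((adj.getD cur PySem.Set.empty).foldl (pvStepA cur) (dist, [])).1 := rfl

-- invariants through A's while-loop, by induction on the fuel (which dominates the measure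
-- queue length + sum of distance values, so the loop always drains the queue)
theorem pvA_outer (adj : PySem.Dict String (PySem.Set String)) (seeds nodes : List String)
    (hadj : ∀ u v, pvE adj u v → v ∈ nodes) :
    ∀ (fuel : Nat) (q : List String) (dist : PySem.Dict String Int),
    q.length + pvMsum nodes dist < fuel →
    dist.keys = nodes →
    (∀ x ∈ q, x ∈ nodes) →
    (∀ n ∈ nodes, 0 ≤ dist.getD n 0 ∧ dist.getD n 0 ≤ 1000000000 ∧
        (dist.getD n 0 = 1000000000 ∨ pvReach adj seeds nodes (dist.getD n 0).toNat n)) →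
    (∀ s ∈ seeds, s ∈ nodes → dist.getD s 0 = 0) →
    (∀ u ∈ nodes, ∀ v, pvE adj u v → dist.getD v 0 ≤ dist.getD u 0 + 1 ∨ u ∈ q) →
    pvGood adj seeds nodes (pvGoA adj fuel q dist) := by
  intro fuel
  induction fuel with
  | zero => intro q dist hm; omega
  | succ fuel ih =>
    intro q dist hm hkeys hq hsound hseed htense
    cases q with
    | nil =>
      show pvGood adj seeds nodes dist
      exact ⟨hkeys, hsound, hseed,
        fun u hu v he => (htense u hu v he).resolve_right (by simp)⟩
    | cons cur rest =>
      rw [pvGoA_cons]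
      have hcurn : cur ∈ nodes := hq cur (by simp)
      have R := pvA_inner adj seeds nodes cur hcurn (adj.getD cur PySem.Set.empty) dist []
        (fun v hv => hadj cur v hv) (fun v hv => hv) hkeys hsound hseed
      obtain ⟨R1, R2, R3, R4, R5, R6, R7, R8, R9, R10⟩ := R
      apply ih
      · simp only [List.length_append]
        simp only [List.length_nil, Nat.add_zero] at R10
        simp only [List.length_cons] at hm
        omega
      · exact R1
      · intro x hx
        rcases List.mem_append.1 hx with h | h
        · exact hq x (by simp [h])
        · rcases R6 x h with h' | h'
          · simp at h'
          · exact hadj cur x h'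
      · exact R8
      · exact R9
      · intro u hu v he
        rcases lt_or_eq_of_le (R2 u) with hlt | heq
        · exact Or.inr (List.mem_append.2 (Or.inr (R5 u hlt)))
        · rcases htense u hu v he with h | h
          · have h2 := R2 v
            left
            omega
          · rcases List.mem_cons.1 h with rfl | h'
            · left; exact R4 v he
            · exact Or.inr (List.mem_append.2 (Or.inl h'))

-- ---------- facts about the shared setup ----------

theorem pvNodes_nodup (rows : List (List (String × String))) : (pvNodes rows).Nodup := by
  unfold pvNodes
  exact ((PySem.List.sorted_perm _ _ _).symm.nodup
    (PySem.Set.nodup_union _ _ (PySem.Set.nodup_ofList _)))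

theorem pvSrc_mem (rows : List (List (String × String))) (r : List (String × String))
    (hr : r ∈ rows) : pvStr r "source" ∈ pvNodes rows := by
  unfold pvNodes
  rw [PySem.List.mem_sorted, PySem.Set.mem_union]
  exact Or.inl ((PySem.Set.mem_ofList _ _).2 (List.mem_map.2 ⟨r, hr, rfl⟩))

theorem pvTgt_mem (rows : List (List (String × String))) (r : List (String × String))
    (hr : r ∈ rows) : pvStr r "target" ∈ pvNodes rows := by
  unfold pvNodes
  rw [PySem.List.mem_sorted, PySem.Set.mem_union]
  exact Or.inr ((PySem.Set.mem_ofList _ _).2 (List.mem_map.2 ⟨r, hr, rfl⟩))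

theorem pvAdj0_not_mem :
    ∀ (l : List String) (d : PySem.Dict String (PySem.Set String)),
    (∀ u v, v ∈ d.getD u PySem.Set.empty → False) →
    ∀ u v, v ∈ (l.foldl (fun d n => d.insert n PySem.Set.empty) d).getD u PySem.Set.empty → False := by
  intro l
  induction l with
  | nil => intro d h; simpa using h
  | cons x xs ih =>
    intro d h
    simp only [List.foldl_cons]
    apply ih
    intro u v hv
    rw [PySem.Dict.getD_insert] at hv
    split_ifs at hv with hux
    · simp [PySem.Set.empty] at hv
    · exact h u v hv

-- one row's two Dict.modify writes, as a membership identity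
theorem pvAdj_row_mem (d : PySem.Dict String (PySem.Set String)) (a b u v : String) :
    (v ∈ ((d.modify a PySem.Set.empty (fun s => PySem.Set.add s b)).modify b PySem.Set.empty
        (fun s => PySem.Set.add s a)).getD u PySem.Set.empty) ↔
      (v ∈ d.getD u PySem.Set.empty ∨ (a = u ∧ b = v) ∨ (b = u ∧ a = v)) := by
  by_cases h3 : a = b <;> by_cases h1 : u = b <;> by_cases h2 : u = a <;>
    simp [PySem.Dict.getD_modify, PySem.Set.mem_add, h1, h2, h3, eq_comm] <;>
    tauto

-- the adjacency built by A is exactly the symmetric closure of the edge list B uses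
theorem pvE_iff (rows : List (List (String × String))) (u v : String) :
    pvE (pvAdj rows) u v ↔
      ∃ e ∈ pvEdges rows, (e.1 = u ∧ e.2 = v) ∨ (e.1 = v ∧ e.2 = u) := by
  have main : ∀ (rs : List (List (String × String))) (d : PySem.Dict String (PySem.Set String)),
      (v ∈ (rs.foldl (fun d r =>
          let a := pvStr r "source"
          let b := pvStr r "target"
          let d := d.modify a PySem.Set.empty (fun s => PySem.Set.add s b)
          d.modify b PySem.Set.empty (fun s => PySem.Set.add s a)) d).getD u PySem.Set.empty) ↔
        (v ∈ d.getD u PySem.Set.empty ∨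
          ∃ r ∈ rs, (pvStr r "source" = u ∧ pvStr r "target" = v) ∨
            (pvStr r "source" = v ∧ pvStr r "target" = u)) := by
    intro rs
    induction rs with
    | nil => intro d; simp
    | cons r rs ih =>
      intro d
      simp only [List.foldl_cons]
      rw [ih, pvAdj_row_mem]
      constructor
      · rintro ((h | h | h) | ⟨r', hr', h'⟩)
        · exact Or.inl h
        · exact Or.inr ⟨r, by simp, Or.inl h⟩
        · exact Or.inr ⟨r, by simp, Or.inr ⟨h.2, h.1⟩⟩
        · exact Or.inr ⟨r', by simp [hr'], h'⟩
      · rintro (h | ⟨r', hr', h'⟩)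
        · exact Or.inl (Or.inl h)
        · rcases List.mem_cons.1 hr' with rfl | hr''
          · rcases h' with ⟨ha, hb⟩ | ⟨ha, hb⟩
            · exact Or.inl (Or.inr (Or.inl ⟨ha, hb⟩))
            · exact Or.inl (Or.inr (Or.inr ⟨hb, ha⟩))
          · exact Or.inr ⟨r', hr'', h'⟩
  unfold pvE pvAdj
  rw [main]
  have hempty : ∀ w, v ∈ ((pvNodes rows).foldl (fun d n => d.insert n PySem.Set.empty)
      PySem.Dict.empty).getD w PySem.Set.empty → False := by
    intro w hw
    exact pvAdj0_not_mem (pvNodes rows) PySem.Dict.empty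
      (by intro u' v' h'; rw [PySem.Dict.getD_empty] at h'; simp [PySem.Set.empty] at h') w v hw
  constructor
  · rintro (h | ⟨r, hr, h'⟩)
    · exact absurd h (fun h => hempty u h)
    · exact ⟨(pvStr r "source", pvStr r "target"), List.mem_map.2 ⟨r, hr, rfl⟩, h'⟩
  · rintro ⟨e, he, h'⟩
    obtain ⟨r, hr, rfl⟩ := List.mem_map.1 he
    exact Or.inr ⟨r, hr, h'⟩

theorem pvAdj_mem (rows : List (List (String × String))) :
    ∀ u v, pvE (pvAdj rows) u v → v ∈ pvNodes rows := by
  intro u v h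
  obtain ⟨e, he, h'⟩ := (pvE_iff rows u v).1 h
  obtain ⟨r, hr, rfl⟩ := List.mem_map.1 he
  rcases h' with ⟨_, hb⟩ | ⟨ha, _⟩
  · exact hb ▸ pvTgt_mem rows r hr
  · exact ha ▸ pvSrc_mem rows r hr

-- the initial all-10^9 table
theorem pvDist0_keys (rows : List (List (String × String))) :
    (pvDist0 rows).keys = pvNodes rows := by
  unfold pvDist0
  rw [PySem.Dict.keys_foldl_insert]
  rw [PySem.Dict.keys_empty, PySem.Set.update_nil_left]
  exact PySem.Set.ofList_eq_self_of_nodup _ (pvNodes_nodup rows)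

theorem pvDist0_getD (rows : List (List (String × String))) (n : String) :
    (pvDist0 rows).getD n 0 = if n ∈ pvNodes rows then 1000000000 else 0 := by
  have h := pvFoldInsertFun (fun _ => 1000000000) (pvNodes rows) PySem.Dict.empty n
  rw [PySem.Dict.getD_empty] at h
  exact h

theorem pvSumMapConst {α : Type} (l : List α) (f : α → Nat) (B : Nat)
    (h : ∀ x ∈ l, f x ≤ B) : (l.map f).sum ≤ l.length * B := by
  induction l with
  | nil => simp
  | cons x xs ih =>
    simp only [List.map_cons, List.sum_cons, List.length_cons]
    rw [Nat.succ_mul]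
    have h1 := h x (by simp)
    have h2 := ih (fun y hy => h y (by simp [hy]))
    omega

-- a 0 entry survives the rest of A's seed loop (it only writes 0s)
theorem pvA_seed_zero_stays :
    ∀ (ss : List String) (dist : PySem.Dict String Int) (q : List String) (n : String),
    dist.getD n 0 = 0 →
    (ss.foldl (fun (p : PySem.Dict String Int × List String) m =>
        if p.1.contains m then (p.1.insert m 0, p.2 ++ [m]) else p) (dist, q)).1.getD n 0 = 0 := by
  intro ss
  induction ss with
  | nil => intro dist q n h; exact h
  | cons s rest ih =>
    intro dist q n h
    simp only [List.foldl_cons]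
    by_cases hc : dist.contains s = true
    · rw [if_pos hc]
      apply ih
      rw [PySem.Dict.getD_insert]
      split_ifs with hns
      · rfl
      · exact h
    · rw [if_neg (by simp [hc])]
      exact ih dist q n h

-- A's seed loop: 'for n in seed_nodes: if n in dist: dist[n] = 0; q.append(n)'
theorem pvA_seed (nodes : List String) :
    ∀ (ss : List String) (dist : PySem.Dict String Int) (q : List String),
    dist.keys = nodes →
    (∀ x ∈ q, x ∈ nodes) →
    (∀ n ∈ nodes, dist.getD n 0 = 1000000000 ∨ (dist.getD n 0 = 0 ∧ n ∈ q)) →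
    ((ss.foldl (fun (p : PySem.Dict String Int × List String) n =>
        if p.1.contains n then (p.1.insert n 0, p.2 ++ [n]) else p) (dist, q)).1.keys = nodes ∧
     (∀ x ∈ (ss.foldl (fun (p : PySem.Dict String Int × List String) n =>
        if p.1.contains n then (p.1.insert n 0, p.2 ++ [n]) else p) (dist, q)).2, x ∈ nodes) ∧
     (∀ n ∈ nodes, (ss.foldl (fun (p : PySem.Dict String Int × List String) n =>
        if p.1.contains n then (p.1.insert n 0, p.2 ++ [n]) else p) (dist, q)).1.getD n 0 = 1000000000 ∨
        ((ss.foldl (fun (p : PySem.Dict String Int × List String) n =>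
          if p.1.contains n then (p.1.insert n 0, p.2 ++ [n]) else p) (dist, q)).1.getD n 0 = 0 ∧
         n ∈ (ss.foldl (fun (p : PySem.Dict String Int × List String) n =>
          if p.1.contains n then (p.1.insert n 0, p.2 ++ [n]) else p) (dist, q)).2)) ∧
     (∀ s ∈ ss, s ∈ nodes → (ss.foldl (fun (p : PySem.Dict String Int × List String) n =>
        if p.1.contains n then (p.1.insert n 0, p.2 ++ [n]) else p) (dist, q)).1.getD s 0 = 0 ∧
        s ∈ (ss.foldl (fun (p : PySem.Dict String Int × List String) n =>
          if p.1.contains n then (p.1.insert n 0, p.2 ++ [n]) else p) (dist, q)).2) ∧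
     (∀ n ∈ nodes, (ss.foldl (fun (p : PySem.Dict String Int × List String) n =>
        if p.1.contains n then (p.1.insert n 0, p.2 ++ [n]) else p) (dist, q)).1.getD n 0 = 0 →
        n ∈ ss ∨ dist.getD n 0 = 0) ∧
     (ss.foldl (fun (p : PySem.Dict String Int × List String) n =>
        if p.1.contains n then (p.1.insert n 0, p.2 ++ [n]) else p) (dist, q)).2.length ≤
        q.length + ss.length) := by
  intro ss
  induction ss with
  | nil =>
    intro dist q hkeys hq hval
    exact ⟨hkeys, hq, hval, by simp, fun n _ h => Or.inr h, by simp⟩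
  | cons s rest ih =>
    intro dist q hkeys hq hval
    by_cases hc : dist.contains s = true
    · have hsn : s ∈ nodes := by
        rw [PySem.Dict.contains_iff_mem_keys, hkeys] at hc
        exact hc
      have hstep : (if dist.contains s then (dist.insert s 0, q ++ [s]) else (dist, q))
          = (dist.insert s 0, q ++ [s]) := by rw [if_pos hc]
      have hget1 : ∀ n, (dist.insert s 0).getD n 0 = if n = s then 0 else dist.getD n 0 := by
        intro n; simp [PySem.Dict.getD_insert]
      have hkeys1 : (dist.insert s 0).keys = nodes := by
        rw [PySem.Dict.keys_insert_of_contains, hkeys]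
        exact hc
      have hq1 : ∀ x ∈ q ++ [s], x ∈ nodes := by
        intro x hx
        rcases List.mem_append.1 hx with h | h
        · exact hq x h
        · simp at h; subst h; exact hsn
      have hval1 : ∀ n ∈ nodes, (dist.insert s 0).getD n 0 = 1000000000 ∨
          ((dist.insert s 0).getD n 0 = 0 ∧ n ∈ q ++ [s]) := by
        intro n hn
        by_cases hns : n = s
        · subst hns
          right
          exact ⟨by rw [hget1, if_pos rfl], by simp⟩
        · rw [hget1, if_neg hns]
          rcases hval n hn with h | ⟨h1, h2⟩
          · exact Or.inl h
          · exact Or.inr ⟨h1, List.mem_append.2 (Or.inl h2)⟩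
      have R := ih (dist.insert s 0) (q ++ [s]) hkeys1 hq1 hval1
      obtain ⟨R1, R2, R3, R4, R5, R6⟩ := R
      simp only [List.foldl_cons, hstep]
      refine ⟨R1, R2, R3, ?_, ?_, ?_⟩
      · intro s' hs' hs'n
        rcases List.mem_cons.1 hs' with rfl | hs''
        · rcases R3 s' hs'n with h | h
          · -- the 0 written for s' survives the rest of the loop, contradicting h
            exfalso
            have h0 : (dist.insert s' 0).getD s' 0 = 0 := by rw [hget1, if_pos rfl]
            have := pvA_seed_zero_stays rest (dist.insert s' 0) (q ++ [s']) s' h0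
            omega
          · exact h
        · exact R4 s' hs'' hs'n
      · intro n hn h0
        rcases R5 n hn h0 with h | h
        · exact Or.inl (by simp [h])
        · rw [hget1] at h
          by_cases hns : n = s
          · exact Or.inl (by simp [hns])
          · rw [if_neg hns] at h
            exact Or.inr h
      · simp only [List.length_append, List.length_cons, List.length_nil] at R6 ⊢
        omega
    · have hstep : (if dist.contains s then (dist.insert s 0, q ++ [s]) else (dist, q))
          = (dist, q) := by rw [if_neg (by simp [hc])]
      have R := ih dist q hkeys hq hval
      obtain ⟨R1, R2, R3, R4, R5, R6⟩ := R
      simp only [List.foldl_cons, hstep]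
      refine ⟨R1, R2, R3, ?_, ?_, by simp only [List.length_cons]; omega⟩
      · intro s' hs' hs'n
        rcases List.mem_cons.1 hs' with rfl | hs''
        · exfalso
          rw [PySem.Dict.contains_iff_mem_keys, hkeys] at hc
          exact hc hs'n
        · exact R4 s' hs'' hs'n
      · intro n hn h0
        rcases R5 n hn h0 with h | h
        · exact Or.inl (by simp [h])
        · exact Or.inr h

theorem pvA_good (rows : List (List (String × String))) (seeds : List String) :
    pvGood (pvAdj rows) seeds (pvNodes rows) (pvFinalA rows seeds) := by
  have hadj := pvAdj_mem rows
  have hk0 := pvDist0_keys rows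
  have S := pvA_seed (pvNodes rows) seeds (pvDist0 rows) [] hk0 (by simp)
    (fun n hn => Or.inl (by rw [pvDist0_getD rows n, if_pos hn]))
  obtain ⟨S1, S2, S3, S4, S5, S6⟩ := S
  have hP : pvSeedP rows seeds = seeds.foldl (fun (p : PySem.Dict String Int × List String) n =>
      if p.1.contains n then (p.1.insert n 0, p.2 ++ [n]) else p) (pvDist0 rows, []) := rfl
  rw [← hP] at S1 S2 S3 S4 S5 S6
  show pvGood (pvAdj rows) seeds (pvNodes rows)
    (pvGoA (pvAdj rows) (seeds.length + (pvNodes rows).length * 1000000000 + 1)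
      (pvSeedP rows seeds).2 (pvSeedP rows seeds).1)
  apply pvA_outer (pvAdj rows) seeds (pvNodes rows) hadj
  · -- the fuel dominates the measure
    simp only [List.length_nil, Nat.zero_add] at S6
    have hb : ∀ n ∈ pvNodes rows, ((pvSeedP rows seeds).1.getD n 0).toNat ≤ 1000000000 := by
      intro n hn
      rcases S3 n hn with h | ⟨h, _⟩ <;> rw [h] <;> omega
    have hsum := pvSumMapConst (pvNodes rows)
      (fun n => ((pvSeedP rows seeds).1.getD n 0).toNat) 1000000000 hb
    unfold pvMsum
    omega
  · exact S1
  · exact S2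
  · intro n hn
    rcases S3 n hn with h | ⟨h0, hq⟩
    · rw [h]; exact ⟨by omega, le_refl _, Or.inl rfl⟩
    · rw [h0]
      refine ⟨le_refl _, by omega, Or.inr ?_⟩
      have hns : n ∈ seeds := by
        rcases S5 n hn h0 with h | h
        · exact h
        · rw [pvDist0_getD rows n, if_pos hn] at h
          exact absurd h (by norm_num)
      exact pvReach.seed hns hn
  · intro s hs hsn
    exact (S4 s hs hsn).1
  · intro u hu v he
    rcases S3 u hu with h | ⟨h0, hq⟩
    · left
      rcases S3 v (hadj u v he) with h' | ⟨h0', _⟩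
      · rw [h, h']; omega
      · rw [h, h0']; omega
    · exact Or.inr hq

-- ---------- B side (Bellman-Ford relaxation to a fixpoint) ----------

-- the first three pvGood conjuncts: what every intermediate B table satisfies
def pvInvBF (adj : PySem.Dict String (PySem.Set String)) (seeds nodes : List String)
    (d : PySem.Dict String Int) : Prop :=
  d.keys = nodes ∧
  (∀ n ∈ nodes, 0 ≤ d.getD n 0 ∧ d.getD n 0 ≤ 1000000000 ∧
      (d.getD n 0 = 1000000000 ∨ pvReach adj seeds nodes (d.getD n 0).toNat n)) ∧
  (∀ s ∈ seeds, s ∈ nodes → d.getD s 0 = 0)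

-- one firing relaxation d[v] := d[u]+1 keeps the invariant and strictly lowers the sum
theorem pvRelax (adj : PySem.Dict String (PySem.Set String)) (seeds nodes : List String)
    (d : PySem.Dict String Int) (u v : String) (hun : u ∈ nodes) (hvn : v ∈ nodes)
    (he : pvE adj u v) (hfire : d.getD u 0 + 1 < d.getD v 0)
    (hinv : pvInvBF adj seeds nodes d) :
    pvInvBF adj seeds nodes (d.insert v (d.getD u 0 + 1)) ∧
    (∀ n, (d.insert v (d.getD u 0 + 1)).getD n 0 ≤ d.getD n 0) ∧
    pvMsum nodes (d.insert v (d.getD u 0 + 1)) < pvMsum nodes d := by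
  obtain ⟨hkeys, hsound, hseed⟩ := hinv
  obtain ⟨hu0, hucap, hur⟩ := hsound u hun
  obtain ⟨hv0, hvcap, hvr⟩ := hsound v hvn
  have hget : ∀ n, (d.insert v (d.getD u 0 + 1)).getD n 0 =
      if n = v then d.getD u 0 + 1 else d.getD n 0 := by
    intro n; simp [PySem.Dict.getD_insert]
  have hgv : (d.insert v (d.getD u 0 + 1)).getD v 0 = d.getD u 0 + 1 := by
    rw [hget, if_pos rfl]
  have hmono : ∀ n, (d.insert v (d.getD u 0 + 1)).getD n 0 ≤ d.getD n 0 := by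
    intro n
    rw [hget]
    split_ifs with h
    · subst h; omega
    · exact le_refl _
  refine ⟨⟨?_, ?_, ?_⟩, hmono, ?_⟩
  · rw [PySem.Dict.keys_insert_of_contains, hkeys]
    rw [PySem.Dict.contains_iff_mem_keys, hkeys]; exact hvn
  · intro n hn
    by_cases hnv : n = v
    · subst hnv
      rw [hgv]
      refine ⟨by omega, by omega, Or.inr ?_⟩
      rcases hur with hcap | hre
      · omega
      · have ht : (d.getD u 0 + 1).toNat = (d.getD u 0).toNat + 1 := by omega
        rw [ht]
        exact pvReach.step hre he
    · rw [hget, if_neg hnv]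
      exact hsound n hn
  · intro s hs hsn
    by_cases hsv : s = v
    · subst hsv
      have := hseed s hs hsn
      rw [hgv]
      omega
    · rw [hget, if_neg hsv]
      exact hseed s hs hsn
  · apply pvSumMap_lt (f := fun n => ((d.insert v (d.getD u 0 + 1)).getD n 0).toNat)
      (g := fun n => (d.getD n 0).toNat)
    · intro x hx; have := hmono x; omega
    · exact hvn
    · rw [hgv]; omega

-- once 'changed' is true it stays true through the rest of the pass
theorem pvStepBF_true (d : PySem.Dict String Int) (e : String × String) :
    (pvStepBF (d, true) e).2 = true := by
  unfold pvStepBF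
  dsimp only
  split_ifs <;> rfl

theorem pvBF_pass_true :
    ∀ (es : List (String × String)) (d : PySem.Dict String Int),
    (es.foldl pvStepBF (d, true)).2 = true := by
  intro es
  induction es with
  | nil => intro d; rfl
  | cons e es ih =>
    intro d
    simp only [List.foldl_cons]
    rcases hp : pvStepBF (d, true) e with ⟨d', b'⟩
    have hb := pvStepBF_true d e
    rw [hp] at hb
    subst hb
    exact ih d'

-- invariants through one full pass of B's 'for a, b in edges' loop
theorem pvBF_pass (adj : PySem.Dict String (PySem.Set String)) (seeds nodes : List String) :
    ∀ (es : List (String × String)) (d : PySem.Dict String Int) (b : Bool),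
    (∀ e ∈ es, e.1 ∈ nodes ∧ e.2 ∈ nodes ∧ pvE adj e.1 e.2 ∧ pvE adj e.2 e.1) →
    pvInvBF adj seeds nodes d →
    (pvInvBF adj seeds nodes (es.foldl pvStepBF (d, b)).1 ∧
     ((es.foldl pvStepBF (d, b)).2 = false → (es.foldl pvStepBF (d, b)).1 = d ∧
        ∀ e ∈ es, d.getD e.2 0 ≤ d.getD e.1 0 + 1 ∧ d.getD e.1 0 ≤ d.getD e.2 0 + 1) ∧
     pvMsum nodes (es.foldl pvStepBF (d, b)).1 ≤ pvMsum nodes d ∧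
     (b = false → (es.foldl pvStepBF (d, b)).2 = true →
        pvMsum nodes (es.foldl pvStepBF (d, b)).1 < pvMsum nodes d)) := by
  intro es
  induction es with
  | nil =>
    intro d b _ hinv
    exact ⟨hinv, fun _ => ⟨rfl, by simp⟩, le_refl _, fun hb ht => by
      simp only [List.foldl_nil] at ht; rw [ht] at hb; exact absurd hb (by simp)⟩
  | cons e es ih =>
    intro d b hes hinv
    obtain ⟨he1, he2, hE12, hE21⟩ := hes e (by simp)
    have hes' : ∀ e' ∈ es, e'.1 ∈ nodes ∧ e'.2 ∈ nodes ∧ pvE adj e'.1 e'.2 ∧ pvE adj e'.2 e'.1 :=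
      fun e' he' => hes e' (by simp [he'])
    simp only [List.foldl_cons]
    by_cases hf1 : d.getD e.1 0 + 1 < d.getD e.2 0
    · -- first relaxation fires; the second test then cannot (it compares d[a]+2 < d[a])
      have hne : e.2 ≠ e.1 := by intro h; rw [h] at hf1; omega
      obtain ⟨hinv', hmono', hdec'⟩ := pvRelax adj seeds nodes d e.1 e.2 he1 he2 hE12 hf1 hinv
      have hg1 : (d.insert e.2 (d.getD e.1 0 + 1)).getD e.1 0 = d.getD e.1 0 := by
        simp [PySem.Dict.getD_insert, Ne.symm hne]
      have hstep : pvStepBF (d, b) e = (d.insert e.2 (d.getD e.1 0 + 1), true) := by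
        unfold pvStepBF
        simp only [hf1, if_pos, if_true]
        rw [if_neg (by rw [hg1, PySem.Dict.getD_insert_self]; omega)]
      rw [hstep]
      obtain ⟨R1, R2, R3, R4⟩ := ih (d.insert e.2 (d.getD e.1 0 + 1)) true hes' hinv'
      refine ⟨R1, ?_, le_trans R3 (le_of_lt hdec'), fun _ _ => lt_of_le_of_lt R3 hdec'⟩
      intro hfalse
      exact absurd (pvBF_pass_true es _) (by rw [hfalse]; simp)
    · -- first test does not fire
      by_cases hf2 : d.getD e.2 0 + 1 < d.getD e.1 0
      · obtain ⟨hinv', hmono', hdec'⟩ := pvRelax adj seeds nodes d e.2 e.1 he2 he1 hE21 hf2 hinv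
        have hstep : pvStepBF (d, b) e = (d.insert e.1 (d.getD e.2 0 + 1), true) := by
          unfold pvStepBF
          simp only [if_neg hf1]
          rw [if_pos hf2]
        rw [hstep]
        obtain ⟨R1, R2, R3, R4⟩ := ih (d.insert e.1 (d.getD e.2 0 + 1)) true hes' hinv'
        refine ⟨R1, ?_, le_trans R3 (le_of_lt hdec'), fun _ _ => lt_of_le_of_lt R3 hdec'⟩
        intro hfalse
        exact absurd (pvBF_pass_true es _) (by rw [hfalse]; simp)
      · have hstep : pvStepBF (d, b) e = (d, b) := by
          unfold pvStepBF
          simp only [if_neg hf1]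
          rw [if_neg hf2]
        rw [hstep]
        obtain ⟨R1, R2, R3, R4⟩ := ih d b hes' hinv
        refine ⟨R1, ?_, R3, R4⟩
        intro hfalse
        obtain ⟨heq, hcons⟩ := R2 hfalse
        refine ⟨heq, ?_⟩
        intro e' he'
        rcases List.mem_cons.1 he' with rfl | he''
        · exact ⟨by omega, by omega⟩
        · exact hcons e' he''

-- B's while-loop reaches a pvGood fixpoint (fuel dominates the decreasing distance sum)
theorem pvBF_go (adj : PySem.Dict String (PySem.Set String)) (seeds nodes : List String)
    (edges : List (String × String))
    (hes : ∀ e ∈ edges, e.1 ∈ nodes ∧ e.2 ∈ nodes ∧ pvE adj e.1 e.2 ∧ pvE adj e.2 e.1)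
    (hcov : ∀ u v, pvE adj u v → ∃ e ∈ edges, (e.1 = u ∧ e.2 = v) ∨ (e.1 = v ∧ e.2 = u)) :
    ∀ (fuel : Nat) (d : PySem.Dict String Int),
    pvInvBF adj seeds nodes d → pvMsum nodes d < fuel →
    pvGood adj seeds nodes (pvGoBF edges fuel d) := by
  intro fuel
  induction fuel with
  | zero => intro d _ hm; omega
  | succ fuel ih =>
    intro d hinv hm
    obtain ⟨R1, R2, R3, R4⟩ := pvBF_pass adj seeds nodes edges d false hes hinv
    show pvGood adj seeds nodes
      (if (edges.foldl pvStepBF (d, false)).2 then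
        pvGoBF edges fuel (edges.foldl pvStepBF (d, false)).1
      else (edges.foldl pvStepBF (d, false)).1)
    by_cases hch : (edges.foldl pvStepBF (d, false)).2 = true
    · rw [if_pos hch]
      exact ih _ R1 (by have := R4 rfl hch; omega)
    · rw [if_neg hch]
      obtain ⟨heq, hcons⟩ := R2 (by simpa using hch)
      rw [heq]
      obtain ⟨hkeys, hsound, hseed⟩ := hinv
      refine ⟨hkeys, hsound, hseed, ?_⟩
      intro u hu v he
      obtain ⟨e, hee, h'⟩ := hcov u v he
      obtain ⟨h1, h2⟩ := hcons e hee
      rcases h' with ⟨ha, hb⟩ | ⟨ha, hb⟩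
      · rw [← ha, ← hb]; omega
      · rw [← ha, ← hb]; omega

-- the initial table of B
theorem pvDistBF_keys (rows : List (List (String × String))) (seeds : List String) :
    (pvDistBF rows seeds).keys = pvNodes rows := by
  unfold pvDistBF
  rw [PySem.Dict.keys_foldl_insert]
  rw [PySem.Dict.keys_empty, PySem.Set.update_nil_left]
  exact PySem.Set.ofList_eq_self_of_nodup _ (pvNodes_nodup rows)

theorem pvDistBF_getD (rows : List (List (String × String))) (seeds : List String) (n : String) :
    (pvDistBF rows seeds).getD n 0 =
      if n ∈ pvNodes rows then (if seeds.contains n then 0 else 1000000000) else 0 := by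
  have h := pvFoldInsertFun (fun x => if seeds.contains x then 0 else 1000000000)
    (pvNodes rows) PySem.Dict.empty n
  rw [PySem.Dict.getD_empty] at h
  exact h

theorem pvB_good (rows : List (List (String × String))) (seeds : List String) :
    pvGood (pvAdj rows) seeds (pvNodes rows)
      (pvGoBF (pvEdges rows) ((pvNodes rows).length * 1000000000 + 1) (pvDistBF rows seeds)) := by
  have hinv : pvInvBF (pvAdj rows) seeds (pvNodes rows) (pvDistBF rows seeds) := by
    refine ⟨pvDistBF_keys rows seeds, ?_, ?_⟩
    · intro n hn
      rw [pvDistBF_getD rows seeds n, if_pos hn]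
      by_cases hc : seeds.contains n = true
      · rw [if_pos hc]
        refine ⟨le_refl _, by omega, Or.inr ?_⟩
        exact pvReach.seed (by simpa using hc) hn
      · rw [if_neg (by simpa using hc)]
        exact ⟨by omega, le_refl _, Or.inl rfl⟩
    · intro s hs hsn
      rw [pvDistBF_getD rows seeds s, if_pos hsn, if_pos (by simpa using hs)]
  apply pvBF_go (pvAdj rows) seeds (pvNodes rows) (pvEdges rows)
  · intro e he
    obtain ⟨r, hr, rfl⟩ := List.mem_map.1 he
    refine ⟨pvSrc_mem rows r hr, pvTgt_mem rows r hr, ?_, ?_⟩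
    · exact (pvE_iff rows _ _).2 ⟨_, he, Or.inl ⟨rfl, rfl⟩⟩
    · exact (pvE_iff rows _ _).2 ⟨_, he, Or.inr ⟨rfl, rfl⟩⟩
  · intro u v he
    exact (pvE_iff rows u v).1 he
  · exact hinv
  · have hb : ∀ n ∈ pvNodes rows, ((pvDistBF rows seeds).getD n 0).toNat ≤ 1000000000 := by
      intro n hn
      rw [pvDistBF_getD rows seeds n, if_pos hn]
      split_ifs <;> omega
    have hsum := pvSumMapConst (pvNodes rows)
      (fun n => ((pvDistBF rows seeds).getD n 0).toNat) 1000000000 hb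
    unfold pvMsum
    omega

-- ---------- assembly ----------

theorem pvItems_eq (d : PySem.Dict String Int) : pvItems d = d.items := rfl

theorem pvFinalA_items (rows : List (List (String × String))) (seeds : List String) :
    pvItems (pvFinalA rows seeds) =
      (pvNodes rows).map (fun k => (k, (pvFinalA rows seeds).getD k 0)) := by
  have hA := pvA_good rows seeds
  have hnd := pvNodes_nodup rows
  rw [pvItems_eq, PySem.Dict.items_eq_map_keys _ (by rw [hA.1]; exact hnd) 0, hA.1]

theorem pvFinalB_items (rows : List (List (String × String))) (seeds : List String) :
    pvItems (pvGoBF (pvEdges rows) ((pvNodes rows).length * 1000000000 + 1) (pvDistBF rows seeds)) =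
      (pvNodes rows).map (fun k =>
        (k, (pvGoBF (pvEdges rows) ((pvNodes rows).length * 1000000000 + 1)
          (pvDistBF rows seeds)).getD k 0)) := by
  have hB := pvB_good rows seeds
  have hnd := pvNodes_nodup rows
  rw [pvItems_eq, PySem.Dict.items_eq_map_keys _ (by rw [hB.1]; exact hnd) 0, hB.1]

theorem pvMapEq (rows : List (List (String × String))) (seeds : List String) :
    (pvNodes rows).map (fun k => (k, (pvFinalA rows seeds).getD k 0)) =
      (pvNodes rows).map (fun k =>
        (k, (pvGoBF (pvEdges rows) ((pvNodes rows).length * 1000000000 + 1)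
          (pvDistBF rows seeds)).getD k 0)) := by
  apply List.map_congr_left
  intro n hn
  rw [pvGood_unique (pvAdj_mem rows) (pvA_good rows seeds) (pvB_good rows seeds) n hn]

-- ===== VERDICT (by name: the statement is the Claim_ definition above) =====
theorem unweighted_shells_spec : Claim_equal_unweighted_shells := by
  unfold Claim_equal_unweighted_shells
  intro rows seeds _ _
  unfold Spec_unweighted_shells unweighted_shells unweighted_shells_alt
  rw [pvFinalA_items rows seeds, pvFinalB_items rows seeds]
  exact pvMapEq rows seeds
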